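-- pv_equiv track=rewrite | github.com/L0WK3Y-IAAN/L0WK3Ys-Offensive-Operations-Toolkit | Mobile-RE-Toolkit/scripts/Android/Apk Puller/APK_Puller.py | resolve_package_selection
-- ===== SOURCE A (Python) =====
-- from typing import List, Tuple, Optional
--
-- def calculate_match_score(query: str, text: str) -> Tuple[int, int, int, str]:
--     """
--     Calculate match score for ranking completions.
--     Returns (priority, -match_position, length, text_lower) for sorting.
--     Lower values = better match.
--
--     Priority levels:
--     0 = Exact match (case-insensitive)
--     1 = Starts with query
--     2 = Contains query as substring
--     3 = Fuzzy match (chars in order)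
--     4 = No match
--     """
--     query_lower = query.lower()
--     text_lower = text.lower()
--
--     # Exact match
--     if query_lower == text_lower:
--         return (0, 0, len(text), text_lower)
--
--     # Starts with
--     if text_lower.startswith(query_lower):
--         return (1, 0, len(text), text_lower)
--
--     # Contains as substring
--     pos = text_lower.find(query_lower)
--     if pos != -1:
--         return (2, -pos, len(text), text_lower)
--
--     # Fuzzy match (characters in order)
--     idx = 0
--     first_match_pos = -1
--     for i, ch in enumerate(text_lower):
--         if idx < len(query_lower) and ch == query_lower[idx]:
--             if first_match_pos == -1:
--                 first_match_pos = i
--             idx += 1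
--
--     if idx == len(query_lower):  # All chars found
--         return (3, -first_match_pos, len(text), text_lower)
--
--     # No match
--     return (4, 0, len(text), text_lower)
--
-- def resolve_package_selection(user_input: str, packages: List[str]) -> Optional[int]:
--     """
--     Resolve user input to package index (0-based).
--     Prioritizes exact matches over fuzzy matches.
--     """
--     user_lower = user_input.lower().strip()
--
--     # Direct numeric selection
--     if user_input.strip().isdigit():
--         idx = int(user_input.strip()) - 1
--         if 0 <= idx < len(packages):
--             return idx
--         return None
--
--     # First, try exact match (case-insensitive) - this handles dropdown selections
--     for i, package in enumerate(packages):
--         if package.lower() == user_lower: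
--             return i
--
--     # Then try starts-with match - prefer longer/more specific matches
--     starts_with_matches = []
--     for i, package in enumerate(packages):
--         if package.lower().startswith(user_lower):
--             starts_with_matches.append((len(package), i, package))
--
--     if starts_with_matches:
--         # Sort by length (longer = more specific), then by index (stable order)
--         starts_with_matches.sort(key=lambda x: (-x[0], x[1]))
--         return starts_with_matches[0][1]  # Return the longest match
--
--     # Find best match using same scoring logic
--     best_score = (4, 0, 0, '')  # Start with "no match"
--     best_idx = None
--
--     for i, package in enumerate(packages):
--         score = calculate_match_score(user_input, package)
--         if score < best_score:
--             best_score = score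
--             best_idx = i
--
--     # Only return if we found at least a fuzzy match
--     if best_score[0] < 4:
--         return best_idx
--
--     return None
-- ===== SOURCE B (Python) =====
-- from typing import List, Optional, Tuple
--
-- def _score_key(query: str, text: str) -> Tuple[int, int, int, str]:
--     """Same ranking tuple as the scoring pass, with the fuzzy scan replaced by an
--     iterator-based subsequence test plus a find of the first query character."""
--     ql = query.lower()
--     tl = text.lower()
--     if ql == tl:
--         return (0, 0, len(text), tl)
--     if tl.startswith(ql):
--         return (1, 0, len(text), tl)
--     pos = tl.find(ql)
--     if pos != -1:
--         return (2, -pos, len(text), tl)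
--     it = iter(tl)
--     if all(c in it for c in ql):          # ql is a subsequence of tl
--         return (3, -tl.find(ql[0]), len(text), tl)
--     return (4, 0, len(text), tl)
--
-- def resolve_package_selection(user_input: str, packages: List[str]) -> Optional[int]:
--     stripped = user_input.strip()
--     if stripped.isdigit():
--         idx = int(stripped) - 1
--         return idx if 0 <= idx < len(packages) else None
--     user_lower = user_input.lower().strip()
--     best = None
--     for i, package in enumerate(packages):
--         pl = package.lower()
--         if pl == user_lower:
--             key = (0, 0, 0, 0, '', i)
--         elif pl.startswith(user_lower):
--             key = (1, -len(package), 0, 0, '', i)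
--         else:
--             p, mpos, ln, tl = _score_key(user_input, package)
--             key = (2, p, mpos, ln, tl, i)
--         if best is None or key < best:
--             best = key
--     if best is None or (best[0] == 2 and best[1] == 4):
--         return None
--     return best[5]
-- ===== Notes on version B (the rewrite author's own statement) =====
-- stated objective: alternative
-- what changed: A's three sequential passes (exact-match scan, startswith collect+sort+head, best-score fold) are replaced by a single fold over the enumerated packages that computes one composite priority key per package and keeps the lexicographic minimum (first index wins ties); A's hand-written fuzzy character loop is replaced by an iterator-based subsequence test plus a find of the first query character.
import Mathlib
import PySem

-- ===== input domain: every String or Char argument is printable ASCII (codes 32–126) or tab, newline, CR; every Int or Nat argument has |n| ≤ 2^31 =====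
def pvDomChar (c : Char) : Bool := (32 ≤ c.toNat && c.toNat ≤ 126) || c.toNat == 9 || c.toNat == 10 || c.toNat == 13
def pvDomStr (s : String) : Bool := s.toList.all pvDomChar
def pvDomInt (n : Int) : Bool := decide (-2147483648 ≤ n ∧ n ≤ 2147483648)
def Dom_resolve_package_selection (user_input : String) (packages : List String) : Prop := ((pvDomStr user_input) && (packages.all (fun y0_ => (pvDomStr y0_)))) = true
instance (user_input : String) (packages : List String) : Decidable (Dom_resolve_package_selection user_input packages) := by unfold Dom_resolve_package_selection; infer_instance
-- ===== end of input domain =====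

-- B replaces A's three sequential scans (exact, startswith-collect-sort, scoring fold) by ONE
-- fold over the enumerated packages that keeps the minimum of a composite priority key
-- (objective: alternative decomposition, same return value).

abbrev pvScore := Int × Int × Int × List Char
abbrev pvK := Int × Int × Int × Int × List Char × Int

-- ===== PORT A =====
-- Python tuple '<' on the 4-tuple score, component-wise lexicographic (exact; strings via strLt)
def pvLt4 (x y : pvScore) : Bool :=
  if x.1 < y.1 then true else if x.1 = y.1 then
    (if x.2.1 < y.2.1 then true else if x.2.1 = y.2.1 then
      (if x.2.2.1 < y.2.2.1 then true else if x.2.2.1 = y.2.2.1 then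
        PySem.Chars.strLt x.2.2.2 y.2.2.2
      else false)
    else false)
  else false

-- the fuzzy 'for i, ch in enumerate(text_lower)' loop of calculate_match_score, state (idx, first_match_pos)
def pvFuzzyAux (ql : List Char) : List Char → Int → Nat → Int → Nat × Int
  | [], _, idx, fmp => (idx, fmp)
  | ch :: rest, i, idx, fmp =>
    if h : idx < ql.length then
      if ch = ql[idx] then
        pvFuzzyAux ql rest (i+1) (idx+1) (if fmp = -1 then i else fmp)
      else pvFuzzyAux ql rest (i+1) idx fmp
    else pvFuzzyAux ql rest (i+1) idx fmp

def pvScoreA (query text : List Char) : pvScore :=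
  let ql := PySem.Chars.lower query
  let tl := PySem.Chars.lower text
  if ql = tl then (0, 0, (text.length : Int), tl)
  else if PySem.Chars.startswith tl ql then (1, 0, (text.length : Int), tl)
  else
    let pos := PySem.Chars.find tl ql
    if pos ≠ -1 then (2, -pos, (text.length : Int), tl)
    else
      let st := pvFuzzyAux ql tl 0 0 (-1)
      if st.1 = ql.length then (3, -st.2, (text.length : Int), tl)
      else (4, 0, (text.length : Int), tl)

-- A's first loop: 'for i, package in enumerate(packages): if package.lower() == user_lower: return i'
def pvFirstExact (ul : List Char) : List (Int × List Char) → Option Int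
  | [] => none
  | v :: rest => if PySem.Chars.lower v.2 = ul then some v.1 else pvFirstExact ul rest

-- A's scoring loop body: 'if score < best_score: best_score, best_idx = score, i'
def pvStepA (ui : List Char) (st : pvScore × Option Int) (v : Int × List Char) : pvScore × Option Int :=
  let s := pvScoreA ui v.2
  if pvLt4 s st.1 then (s, some v.1) else st

def resolve_package_selection (user_input : String) (packages : List String) : Option Int :=
  let ui := user_input.toList
  let user_lower := PySem.Chars.strip (PySem.Chars.lower ui)
  if PySem.Chars.strIsdigit (PySem.Chars.strip ui) then
    match PySem.Int.ofChars? (PySem.Chars.strip ui) with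
    | some n => if 0 ≤ n - 1 ∧ n - 1 < (packages.length : Int) then some (n - 1) else none
    | none => none  -- unreachable: int() succeeds on a digit string
  else
    let E := PySem.List.enumerate (packages.map String.toList) 0
    match pvFirstExact user_lower E with
    | some i => some i
    | none =>
      let mtchs := E.foldl (fun acc v =>
        if PySem.Chars.startswith (PySem.Chars.lower v.2) user_lower then
          acc ++ [((v.2.length : Int), v.1, v.2)] else acc) []
      if mtchs ≠ [] then
        match PySem.List.sorted2 mtchs (fun x => -x.1) (fun x => x.2.1) with
        | [] => none  -- unreachable: sorting a nonempty list
        | x :: _ => some x.2.1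
      else
        let r := E.foldl (pvStepA ui) ((4, 0, 0, ([] : List Char)), none)
        if r.1.1 < 4 then r.2 else none

-- ===== PORT B =====
-- 'it = iter(tl); all(c in it for c in ql)' — consuming-iterator subsequence test (exact)
def pvIsSub : List Char → List Char → Bool
  | [], _ => true
  | _ :: _, [] => false
  | c :: cs, t :: ts => if t = c then pvIsSub cs ts else pvIsSub (c :: cs) ts

def pvScoreB (query text : List Char) : pvScore :=
  let ql := PySem.Chars.lower query
  let tl := PySem.Chars.lower text
  if ql = tl then (0, 0, (text.length : Int), tl)
  else if PySem.Chars.startswith tl ql then (1, 0, (text.length : Int), tl)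
  else
    let pos := PySem.Chars.find tl ql
    if pos ≠ -1 then (2, -pos, (text.length : Int), tl)
    -- 'tl.find(ql[0])' ported as find tl (ql.take 1): the branch is only reached with ql ≠ []
    else if pvIsSub ql tl then (3, -(PySem.Chars.find tl (ql.take 1)), (text.length : Int), tl)
    else (4, 0, (text.length : Int), tl)

-- Python tuple '<' on the 6-tuple key (exact; strings via strLt)
def pvLt6 (x y : pvK) : Bool :=
  if x.1 < y.1 then true else if x.1 = y.1 then
    (if x.2.1 < y.2.1 then true else if x.2.1 = y.2.1 then
      (if x.2.2.1 < y.2.2.1 then true else if x.2.2.1 = y.2.2.1 then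
        (if x.2.2.2.1 < y.2.2.2.1 then true else if x.2.2.2.1 = y.2.2.2.1 then
          (if PySem.Chars.strLt x.2.2.2.2.1 y.2.2.2.2.1 then true
           else if x.2.2.2.2.1 = y.2.2.2.2.1 then decide (x.2.2.2.2.2 < y.2.2.2.2.2)
           else false)
        else false)
      else false)
    else false)
  else false

def pvKey (ul ui : List Char) (v : Int × List Char) : pvK :=
  let pl := PySem.Chars.lower v.2
  if pl = ul then (0, 0, 0, 0, [], v.1)
  else if PySem.Chars.startswith pl ul then (1, -(v.2.length : Int), 0, 0, [], v.1)
  else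
    let s := pvScoreB ui v.2
    (2, s.1, s.2.1, s.2.2.1, s.2.2.2, v.1)

-- 'if best is None or key < best: best = key'
def pvStepB (ul ui : List Char) (best : Option pvK) (v : Int × List Char) : Option pvK :=
  let k := pvKey ul ui v
  match best with
  | none => some k
  | some b => if pvLt6 k b then some k else some b

def resolve_package_selection_alt (user_input : String) (packages : List String) : Option Int :=
  let ui := user_input.toList
  if PySem.Chars.strIsdigit (PySem.Chars.strip ui) then
    match PySem.Int.ofChars? (PySem.Chars.strip ui) with
    | some n => if 0 ≤ n - 1 ∧ n - 1 < (packages.length : Int) then some (n - 1) else none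
    | none => none  -- unreachable: int() succeeds on a digit string
  else
    let ul := PySem.Chars.strip (PySem.Chars.lower ui)
    match (PySem.List.enumerate (packages.map String.toList) 0).foldl (pvStepB ul ui) none with
    | none => none
    | some k => if k.1 = 2 ∧ k.2.1 = 4 then none else some k.2.2.2.2.2

-- ===== PRECONDITION & SPEC =====
def Spec_resolve_package_selection (user_input : String) (packages : List String) (out : Option Int) : Prop := out = resolve_package_selection_alt user_input packages
instance (user_input : String) (packages : List String) (out : Option Int) : Decidable (Spec_resolve_package_selection user_input packages out) := by unfold Spec_resolve_package_selection; infer_instance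

-- ===== CLAIM (what is proved, stated in full; the proofs are below) =====
def Claim_equal_resolve_package_selection : Prop := ∀ (user_input : String) (packages : List String), Dom_resolve_package_selection user_input packages → Spec_resolve_package_selection user_input packages (resolve_package_selection user_input packages)

-- ===== LEMMAS AND PROOFS =====

def pvLtP (x y : pvK) : Prop :=
  x.1 < y.1 ∨ (x.1 = y.1 ∧ (x.2.1 < y.2.1 ∨ (x.2.1 = y.2.1 ∧
    (x.2.2.1 < y.2.2.1 ∨ (x.2.2.1 = y.2.2.1 ∧ (x.2.2.2.1 < y.2.2.2.1 ∨ (x.2.2.2.1 = y.2.2.2.1 ∧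
      (x.2.2.2.2.1 < y.2.2.2.2.1 ∨ (x.2.2.2.2.1 = y.2.2.2.2.1 ∧ x.2.2.2.2.2 < y.2.2.2.2.2)))))))))

theorem pvLt6_iff {x y : pvK} : pvLt6 x y = true ↔ pvLtP x y := by
  simp only [pvLt6, pvLtP, PySem.Chars.strLt]
  split_ifs <;> simp_all

theorem pvLt6_irrefl (x : pvK) : pvLt6 x x = false := by
  simp [pvLt6, PySem.Chars.strLt]

theorem pvLt6_asymm {x y : pvK} (h : pvLt6 x y = true) : pvLt6 y x = false := by
  rw [pvLt6_iff] at h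
  rw [Bool.eq_false_iff, Ne, pvLt6_iff]
  unfold pvLtP at h ⊢
  intro h2
  rcases h with h | ⟨e1, h⟩ <;> rcases h2 with h2 | ⟨f1, h2⟩ <;> try omega
  rcases h with h | ⟨e2, h⟩ <;> rcases h2 with h2 | ⟨f2, h2⟩ <;> try omega
  rcases h with h | ⟨e3, h⟩ <;> rcases h2 with h2 | ⟨f3, h2⟩ <;> try omega
  rcases h with h | ⟨e4, h⟩ <;> rcases h2 with h2 | ⟨f4, h2⟩ <;> try omega
  rcases h with h | ⟨e5, h⟩ <;> rcases h2 with h2 | ⟨f5, h2⟩ <;> try omega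
  · exact absurd h2 (List.lt_asymm h)
  · rw [f5] at h; exact absurd h (List.lt_irrefl _)
  · rw [e5] at h2; exact absurd h2 (List.lt_irrefl _)

theorem pvFoldB_shape (ul ui : List Char) :
    ∀ (l : List (Int × List Char)) (acc : Option pvK),
      l.foldl (pvStepB ul ui) acc = acc ∨ ∃ v ∈ l, l.foldl (pvStepB ul ui) acc = some (pvKey ul ui v) := by
  intro l
  induction l with
  | nil => intro acc; exact Or.inl rfl
  | cons x t ih =>
    intro acc
    have step : pvStepB ul ui acc x = acc ∨ pvStepB ul ui acc x = some (pvKey ul ui x) := by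
      unfold pvStepB
      match acc with
      | none => exact Or.inr rfl
      | some b => dsimp only; split <;> [exact Or.inr rfl; exact Or.inl rfl]
    rw [List.foldl_cons]
    rcases ih (pvStepB ul ui acc x) with h | ⟨v, hv, h⟩
    · rw [h]
      rcases step with h2 | h2
      · exact Or.inl h2
      · exact Or.inr ⟨x, List.mem_cons_self, h2⟩
    · exact Or.inr ⟨v, List.mem_cons_of_mem _ hv, h⟩

theorem pvFoldB_keep (ul ui : List Char) :
    ∀ (l : List (Int × List Char)) (b : pvK),
      (∀ v ∈ l, pvLt6 (pvKey ul ui v) b = false) →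
      l.foldl (pvStepB ul ui) (some b) = some b := by
  intro l
  induction l with
  | nil => intro b _; rfl
  | cons x t ih =>
    intro b h
    rw [List.foldl_cons]
    have : pvStepB ul ui (some b) x = some b := by
      unfold pvStepB; dsimp only; rw [h x List.mem_cons_self]; rfl
    rw [this]
    exact ih b (fun v hv => h v (List.mem_cons_of_mem _ hv))

theorem pvFoldB_min (ul ui : List Char) (l : List (Int × List Char)) (u : Int × List Char)
    (hu : u ∈ l) (hmin : ∀ v ∈ l, v ≠ u → pvLt6 (pvKey ul ui u) (pvKey ul ui v) = true) :
    l.foldl (pvStepB ul ui) none = some (pvKey ul ui u) := by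
  obtain ⟨l1, l2, rfl⟩ := List.append_of_mem hu
  rw [List.foldl_append, List.foldl_cons]
  have hstate : (l1.foldl (pvStepB ul ui) none) = none ∨
      ∃ v ∈ l1, l1.foldl (pvStepB ul ui) none = some (pvKey ul ui v) :=
    pvFoldB_shape ul ui l1 none
  have hafter : pvStepB ul ui (l1.foldl (pvStepB ul ui) none) u = some (pvKey ul ui u) := by
    rcases hstate with h | ⟨v, hv, h⟩
    · rw [h]; rfl
    · rw [h]; unfold pvStepB; dsimp only
      by_cases hvu : v = u
      · subst hvu; rw [pvLt6_irrefl]; rfl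
      · rw [hmin v (by simp [hv]) hvu]; rfl
  rw [hafter]
  refine pvFoldB_keep ul ui l2 _ (fun v hv => ?_)
  by_cases hvu : v = u
  · subst hvu; exact pvLt6_irrefl _
  · exact pvLt6_asymm (hmin v (by simp [hv]) hvu)

def pvBefore {α : Type} (k1 k2 : α → Int) (a b : α) : Bool :=
  decide (k1 a < k1 b) || (!decide (k1 b < k1 a) && decide (k2 a < k2 b))

def pvLe2 {α : Type} (k1 k2 : α → Int) (a b : α) : Prop :=
  k1 a < k1 b ∨ (k1 a = k1 b ∧ k2 a ≤ k2 b)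

theorem pvInsertBy_cons {α : Type} (before : α → α → Bool) (x a : α) (l : List α) :
    PySem.List.insertBy before x (a :: l) =
      if before x a then x :: a :: l else a :: PySem.List.insertBy before x l := by
  rfl

theorem pvIns_aux {α : Type} (k1 k2 : α → Int) :
    ∀ (xs : List α) (a : α) (l : List α),
      (∀ y ∈ a :: l, pvLe2 k1 k2 a y) →
      ∃ h t, xs.foldl (fun acc x => PySem.List.insertBy (pvBefore k1 k2) x acc) (a :: l) = h :: t ∧
        (∀ y, (y ∈ a :: l ∨ y ∈ xs) → pvLe2 k1 k2 h y) := by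
  intro xs
  induction xs with
  | nil =>
    intro a l hmin
    refine ⟨a, l, rfl, fun y hy => hmin y ?_⟩
    rcases hy with h | h
    · exact h
    · simp at h
  | cons x xs ih =>
    intro a l hmin
    rw [List.foldl_cons, pvInsertBy_cons]
    by_cases hb : pvBefore k1 k2 x a = true
    · rw [if_pos hb]
      have hxa : pvLe2 k1 k2 x a := by
        unfold pvBefore at hb; unfold pvLe2; simp at hb; omega
      have hmin' : ∀ y ∈ x :: a :: l, pvLe2 k1 k2 x y := by
        intro y hy
        rcases List.mem_cons.mp hy with rfl | hy
        · unfold pvLe2; omega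
        · have := hmin y hy
          unfold pvLe2 at *; omega
      obtain ⟨h, t, heq, hall⟩ := ih x (a :: l) hmin'
      refine ⟨h, t, heq, fun y hy => hall y ?_⟩
      rcases hy with hy | hy
      · exact Or.inl (List.mem_cons_of_mem _ hy)
      · rcases List.mem_cons.mp hy with rfl | hy
        · exact Or.inl List.mem_cons_self
        · exact Or.inr hy
    · rw [if_neg hb]
      have hax : pvLe2 k1 k2 a x := by
        unfold pvBefore at hb; unfold pvLe2; simp at hb; omega
      have hmin' : ∀ y ∈ a :: PySem.List.insertBy (pvBefore k1 k2) x l, pvLe2 k1 k2 a y := by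
        intro y hy
        rcases List.mem_cons.mp hy with rfl | hy
        · unfold pvLe2; omega
        · rcases (PySem.List.mem_insertBy _ _ _ _).mp hy with rfl | hy
          · exact hax
          · exact hmin y (List.mem_cons_of_mem _ hy)
      obtain ⟨h, t, heq, hall⟩ := ih a (PySem.List.insertBy (pvBefore k1 k2) x l) hmin'
      refine ⟨h, t, heq, fun y hy => hall y ?_⟩
      rcases hy with hy | hy
      · rcases List.mem_cons.mp hy with rfl | hy
        · exact Or.inl List.mem_cons_self
        · exact Or.inl (List.mem_cons_of_mem _ ((PySem.List.mem_insertBy _ _ _ _).mpr (Or.inr hy)))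
      · rcases List.mem_cons.mp hy with rfl | hy
        · exact Or.inl (List.mem_cons_of_mem _ ((PySem.List.mem_insertBy _ _ _ _).mpr (Or.inl rfl)))
        · exact Or.inr hy

theorem pvSorted2_head_min {α : Type} (k1 k2 : α → Int) (xs : List α) (m : α) (t : List α)
    (hs : PySem.List.sorted2 xs k1 k2 false = m :: t) :
    ∀ y ∈ xs, pvLe2 k1 k2 m y := by
  match xs with
  | [] => simp [PySem.List.sorted2] at hs
  | x :: xs =>
    have hrw : PySem.List.sorted2 (x :: xs) k1 k2 false =
        xs.foldl (fun acc z => PySem.List.insertBy (pvBefore k1 k2) z acc) [x] := by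
      rfl
    obtain ⟨h, t', heq, hall⟩ := pvIns_aux k1 k2 xs x []
      (by intro y hy; simp at hy; subst hy; unfold pvLe2; omega)
    rw [hrw, heq] at hs
    obtain ⟨rfl, rfl⟩ : h = m ∧ t' = t := by simpa using hs
    intro y hy
    rcases List.mem_cons.mp hy with rfl | hy
    · exact hall y (Or.inl List.mem_cons_self)
    · exact hall y (Or.inr hy)

theorem pvFirstExact_none_iff (ul : List Char) :
    ∀ (E : List (Int × List Char)),
      pvFirstExact ul E = none ↔ ∀ v ∈ E, PySem.Chars.lower v.2 ≠ ul := by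
  intro E
  induction E with
  | nil => simp [pvFirstExact]
  | cons v rest ih =>
    unfold pvFirstExact
    by_cases h : PySem.Chars.lower v.2 = ul
    · simp [h]
    · simp [h, ih]

theorem pvFirstExact_some (ul : List Char) :
    ∀ (E : List (Int × List Char)) (i : Int), pvFirstExact ul E = some i →
      ∃ E1 v E2, E = E1 ++ v :: E2 ∧ PySem.Chars.lower v.2 = ul ∧ i = v.1 ∧
        ∀ w ∈ E1, PySem.Chars.lower w.2 ≠ ul := by
  intro E
  induction E with
  | nil => intro i h; simp [pvFirstExact] at h
  | cons v rest ih =>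
    intro i h
    unfold pvFirstExact at h
    by_cases hv : PySem.Chars.lower v.2 = ul
    · rw [if_pos hv] at h
      exact ⟨[], v, rest, by simp, hv, by simpa using h.symm, by simp⟩
    · rw [if_neg hv] at h
      obtain ⟨E1, w, E2, heq, hw, hi, hall⟩ := ih i h
      refine ⟨v :: E1, w, E2, by simp [heq], hw, hi, ?_⟩
      intro z hz
      rcases List.mem_cons.mp hz with rfl | hz
      · exact hv
      · exact hall z hz

theorem pvEnum_bound {α : Type} :
    ∀ (xs : List α) (s : Int), ∀ v ∈ PySem.List.enumerate xs s, s ≤ v.1 := by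
  intro xs
  induction xs with
  | nil => intro s v hv; rw [PySem.List.enumerate_nil] at hv; simp at hv
  | cons x t ih =>
    intro s v hv
    rw [PySem.List.enumerate_cons] at hv
    rcases List.mem_cons.mp hv with rfl | hv
    · exact le_refl _
    · have := ih (s + 1) v hv; omega

theorem pvEnum_pairwise {α : Type} :
    ∀ (xs : List α) (s : Int),
      List.Pairwise (fun a b => a.1 < b.1) (PySem.List.enumerate xs s) := by
  intro xs
  induction xs with
  | nil => intro s; rw [PySem.List.enumerate_nil]; exact List.Pairwise.nil
  | cons x t ih =>
    intro s
    rw [PySem.List.enumerate_cons]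
    exact List.Pairwise.cons (fun v hv => by have := pvEnum_bound t (s+1) v hv; omega) (ih (s+1))

theorem pvPairwise_index_inj {l : List (Int × List Char)}
    (hp : List.Pairwise (fun a b => a.1 < b.1) l) {a b : Int × List Char}
    (ha : a ∈ l) (hb : b ∈ l) (heq : a.1 = b.1) : a = b := by
  induction l with
  | nil => simp at ha
  | cons x t ih =>
    rcases List.mem_cons.mp ha with rfl | ha' <;> rcases List.mem_cons.mp hb with rfl | hb'
    · rfl
    · have := (List.pairwise_cons.mp hp).1 b hb'; exact absurd heq (by omega)
    · have := (List.pairwise_cons.mp hp).1 a ha'; exact absurd heq (by omega)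
    · exact ih (List.pairwise_cons.mp hp).2 ha' hb'

theorem pvFuzzy_stay (ql : List Char) :
    ∀ (tl : List Char) (i : Int) (idx : Nat) (fmp : Int), ¬ idx < ql.length →
      pvFuzzyAux ql tl i idx fmp = (idx, fmp) := by
  intro tl
  induction tl with
  | nil => intro i idx fmp h; rfl
  | cons c ts ih =>
    intro i idx fmp h
    unfold pvFuzzyAux
    rw [dif_neg h]
    exact ih _ _ _ h

theorem pvFuzzy_keepFmp (ql : List Char) :
    ∀ (tl : List Char) (i : Int) (idx : Nat) (fmp : Int), fmp ≠ -1 →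
      (pvFuzzyAux ql tl i idx fmp).2 = fmp := by
  intro tl
  induction tl with
  | nil => intro i idx fmp _; rfl
  | cons c ts ih =>
    intro i idx fmp h
    unfold pvFuzzyAux
    by_cases h1 : idx < ql.length
    · rw [dif_pos h1]
      by_cases h2 : c = ql[idx]
      · rw [if_pos h2, if_neg h]; exact ih _ _ _ h
      · rw [if_neg h2]; exact ih _ _ _ h
    · rw [dif_neg h1]; exact ih _ _ _ h

theorem pvFuzzy_sub_iff (ql : List Char) :
    ∀ (tl : List Char) (i : Int) (idx : Nat) (fmp : Int), idx ≤ ql.length →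
      ((pvFuzzyAux ql tl i idx fmp).1 = ql.length ↔ pvIsSub (ql.drop idx) tl = true) := by
  intro tl
  induction tl with
  | nil =>
    intro i idx fmp h
    show (idx = ql.length ↔ _)
    rcases Nat.lt_or_ge idx ql.length with hlt | hge
    · rw [List.drop_eq_getElem_cons hlt]
      show _ ↔ pvIsSub (ql[idx] :: _) [] = true
      unfold pvIsSub
      simp; omega
    · have : ql.drop idx = [] := List.drop_eq_nil_of_le hge
      rw [this]
      unfold pvIsSub
      simp; omega
  | cons c ts ih =>
    intro i idx fmp h
    unfold pvFuzzyAux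
    rcases Nat.lt_or_ge idx ql.length with hlt | hge
    · rw [dif_pos hlt, List.drop_eq_getElem_cons hlt]
      show _ ↔ pvIsSub (ql[idx] :: ql.drop (idx+1)) (c :: ts) = true
      unfold pvIsSub
      by_cases hc : c = ql[idx]
      · rw [if_pos hc, if_pos hc]
        exact ih _ _ _ hlt
      · rw [if_neg hc, if_neg hc]
        rw [← List.drop_eq_getElem_cons hlt]
        exact ih _ _ _ (by omega)
    · rw [dif_neg (by omega), pvFuzzy_stay ql ts _ _ _ (by omega)]
      have : ql.drop idx = [] := List.drop_eq_nil_of_le hge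
      rw [this]
      unfold pvIsSub
      simp; omega

theorem pvFindGo_single :
    ∀ (tl : List Char) (k : Nat) (c : Char), c ∈ tl →
      PySem.Chars.find.go [c] tl k = (k : Int) + (tl.findIdx (· == c) : Int) := by
  intro tl
  induction tl with
  | nil => intro k c h; simp at h
  | cons h t ih =>
    intro k c hc
    unfold PySem.Chars.find.go
    by_cases he : c = h
    · subst he
      have : List.isPrefixOf [c] (c :: t) = true := by simp [List.isPrefixOf]
      rw [this]
      simp [List.findIdx_cons]
    · have : List.isPrefixOf [c] (h :: t) = false := by
        simp [List.isPrefixOf]; exact fun hh => absurd hh he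
      rw [this]
      have hmem : c ∈ t := by
        rcases List.mem_cons.mp hc with hh | hm
        · exact absurd hh he
        · exact hm
      rw [ih (k+1) c hmem]
      have : (h == c) = false := by simp; exact fun hh => absurd hh.symm he
      rw [List.findIdx_cons, this]
      simp; ring

theorem pvFind_single (tl : List Char) (c : Char) (h : c ∈ tl) :
    PySem.Chars.find tl [c] = (tl.findIdx (· == c) : Int) := by
  show PySem.Chars.find.go [c] tl 0 = _
  rw [pvFindGo_single tl 0 c h]
  simp

theorem pvIsSub_head_mem : ∀ (cs tl : List Char) (c : Char), pvIsSub (c :: cs) tl = true → c ∈ tl := by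
  intro cs tl
  induction tl generalizing cs with
  | nil => intro c h; simp [pvIsSub] at h
  | cons t ts ih =>
    intro c h
    unfold pvIsSub at h
    by_cases he : t = c
    · subst he; exact List.mem_cons_self
    · rw [if_neg he] at h
      exact List.mem_cons_of_mem _ (ih cs c h)

theorem pvStartswith_nil (s : List Char) : PySem.Chars.startswith s [] = true :=
  (PySem.Chars.startswith_iff s []).mpr (List.nil_prefix)

theorem pvFuzzy_fmp (q0 : Char) (qs : List Char) :
    ∀ (tl : List Char) (i : Int), 0 ≤ i → q0 ∈ tl →
      (pvFuzzyAux (q0 :: qs) tl i 0 (-1)).2 = i + (tl.findIdx (· == q0) : Int) := by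
  intro tl
  induction tl with
  | nil => intro i _ h; simp at h
  | cons c ts ih =>
    intro i hi hc
    unfold pvFuzzyAux
    rw [dif_pos (by simp)]
    by_cases he : c = (q0 :: qs)[0]
    · simp only [List.getElem_cons_zero] at he
      subst he
      rw [if_pos rfl]
      simp only [List.getElem_cons_zero, if_true]
      rw [pvFuzzy_keepFmp _ ts _ _ i (by omega)]
      simp [List.findIdx_cons]
    · simp only [List.getElem_cons_zero] at he
      rw [if_neg (by simpa using he)]
      have hmem : q0 ∈ ts := by
        rcases List.mem_cons.mp hc with hh | hm
        · exact absurd hh (fun hx => he hx.symm)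
        · exact hm
      rw [ih (i+1) (by omega) hmem]
      rw [List.findIdx_cons]
      have : (c == q0) = false := by simpa using he
      rw [this]
      simp; ring

theorem pvScoreA_eq (query text : List Char) : pvScoreA query text = pvScoreB query text := by
  unfold pvScoreA pvScoreB
  by_cases h1 : PySem.Chars.lower query = PySem.Chars.lower text
  · simp [h1]
  · rw [if_neg h1, if_neg h1]
    by_cases h2 : PySem.Chars.startswith (PySem.Chars.lower text) (PySem.Chars.lower query) = true
    · rw [if_pos h2, if_pos h2]
    · rw [if_neg h2, if_neg h2]
      by_cases h3 : PySem.Chars.find (PySem.Chars.lower text) (PySem.Chars.lower query) ≠ -1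
      · rw [if_pos h3, if_pos h3]
      · rw [if_neg h3, if_neg h3]
        have hq : PySem.Chars.lower query ≠ [] := by
          intro hnil
          rw [hnil] at h2
          exact h2 (pvStartswith_nil _)
        obtain ⟨q0, qs, hql⟩ : ∃ q0 qs, PySem.Chars.lower query = q0 :: qs := by
          cases hql : PySem.Chars.lower query with
          | nil => exact absurd hql hq
          | cons a b => exact ⟨a, b, rfl⟩
        rw [hql]
        have hsub := pvFuzzy_sub_iff (q0 :: qs) (PySem.Chars.lower text) 0 0 (-1) (by omega)
        simp only [List.drop_zero] at hsub
        by_cases h4 : pvIsSub (q0 :: qs) (PySem.Chars.lower text) = true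
        · rw [if_pos h4, if_pos (hsub.mpr h4)]
          have hmem := pvIsSub_head_mem qs (PySem.Chars.lower text) q0 h4
          rw [pvFuzzy_fmp q0 qs (PySem.Chars.lower text) 0 (by omega) hmem]
          show _ = (3, -(PySem.Chars.find (PySem.Chars.lower text) [q0]), _, _)
          rw [pvFind_single _ _ hmem]
          simp
        · rw [if_neg h4, if_neg (fun hh => h4 (hsub.mp hh))]

def pvLtP4 (x y : pvScore) : Prop :=
  x.1 < y.1 ∨ (x.1 = y.1 ∧ (x.2.1 < y.2.1 ∨ (x.2.1 = y.2.1 ∧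
    (x.2.2.1 < y.2.2.1 ∨ (x.2.2.1 = y.2.2.1 ∧ x.2.2.2 < y.2.2.2)))))

theorem pvLt4_iff {x y : pvScore} : pvLt4 x y = true ↔ pvLtP4 x y := by
  simp only [pvLt4, pvLtP4, PySem.Chars.strLt]
  split_ifs <;> simp_all

theorem pvKey_exact {ul ui : List Char} {v : Int × List Char} (h : PySem.Chars.lower v.2 = ul) :
    pvKey ul ui v = (0, 0, 0, 0, [], v.1) := by
  simp [pvKey, h]

theorem pvKey_sw {ul ui : List Char} {v : Int × List Char} (h1 : PySem.Chars.lower v.2 ≠ ul)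
    (h2 : PySem.Chars.startswith (PySem.Chars.lower v.2) ul = true) :
    pvKey ul ui v = (1, -(v.2.length : Int), 0, 0, [], v.1) := by
  simp [pvKey, h1, h2]

theorem pvKey_other {ul ui : List Char} {v : Int × List Char} (h1 : PySem.Chars.lower v.2 ≠ ul)
    (h2 : PySem.Chars.startswith (PySem.Chars.lower v.2) ul = false) :
    pvKey ul ui v = (2, (pvScoreB ui v.2).1, (pvScoreB ui v.2).2.1,
      (pvScoreB ui v.2).2.2.1, (pvScoreB ui v.2).2.2.2, v.1) := by
  simp [pvKey, h1, h2]

theorem pvLt6_fst {x y : pvK} (h : x.1 < y.1) : pvLt6 x y = true := by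
  rw [pvLt6_iff]; exact Or.inl h

theorem pvLt6_zeros {i j : Int} (h : i < j) :
    pvLt6 (0, 0, 0, 0, [], i) (0, 0, 0, 0, [], j) = true := by
  rw [pvLt6_iff]; unfold pvLtP; simp; omega

theorem pvLt6_sw {a b i j : Int} (h : a < b ∨ (a = b ∧ i < j)) :
    pvLt6 (1, a, 0, 0, [], i) (1, b, 0, 0, [], j) = true := by
  rw [pvLt6_iff]; unfold pvLtP; simp; omega

theorem pvLt6_two_iff {a1 a2 a3 ai b1 b2 b3 bi : Int} {a4 b4 : List Char} :
    pvLt6 (2, a1, a2, a3, a4, ai) (2, b1, b2, b3, b4, bi) = true ↔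
      (pvLt4 (a1, a2, a3, a4) (b1, b2, b3, b4) = true ∨
        (a1 = b1 ∧ a2 = b2 ∧ a3 = b3 ∧ a4 = b4 ∧ ai < bi)) := by
  rw [pvLt6_iff, pvLt4_iff]; unfold pvLtP pvLtP4; simp; tauto

theorem pvScoreA_fst_cases (q t : List Char) :
    (pvScoreA q t).1 = 0 ∨ (pvScoreA q t).1 = 1 ∨ (pvScoreA q t).1 = 2 ∨
      (pvScoreA q t).1 = 3 ∨ (pvScoreA q t).1 = 4 := by
  unfold pvScoreA; dsimp only; split_ifs <;> simp

theorem pvScoreA_p4 {q t : List Char} (h : (pvScoreA q t).1 = 4) :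
    pvScoreA q t = (4, 0, (t.length : Int), PySem.Chars.lower t) := by
  unfold pvScoreA at h ⊢; dsimp only at h ⊢; split_ifs at h ⊢ <;> simp_all

theorem pvLt4_init {q t : List Char} (h : pvLt4 (pvScoreA q t) (4, 0, 0, []) = true) :
    (pvScoreA q t).1 < 4 := by
  rcases pvScoreA_fst_cases q t with h0 | h0 | h0 | h0 | h0 <;> try omega
  exfalso
  rw [pvScoreA_p4 h0] at h
  rw [pvLt4_iff] at h
  unfold pvLtP4 at h
  simp at h
  omega

theorem pvLt4_fst_le {x y : pvScore} (h : pvLt4 x y = true) : x.1 ≤ y.1 := by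
  rw [pvLt4_iff] at h; unfold pvLtP4 at h; omega

theorem pvLt4_of_fst_lt {x y : pvScore} (h : x.1 < y.1) : pvLt4 x y = true := by
  rw [pvLt4_iff]; exact Or.inl h

theorem pvStepB_none (ul ui : List Char) (v : Int × List Char) :
    pvStepB ul ui none v = some (pvKey ul ui v) := rfl

theorem pvStepB_some (ul ui : List Char) (b : pvK) (v : Int × List Char) :
    pvStepB ul ui (some b) v =
      if pvLt6 (pvKey ul ui v) b = true then some (pvKey ul ui v) else some b := rfl

theorem pvCase3_loop (ui ul : List Char) :
    ∀ (E : List (Int × List Char)) (bs : pvScore) (bi : Option Int) (best : Option pvK),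
      (∀ v ∈ E, PySem.Chars.lower v.2 ≠ ul ∧
        PySem.Chars.startswith (PySem.Chars.lower v.2) ul = false) →
      List.Pairwise (fun a b => a.1 < b.1) E →
      ((bi = none ∧ bs = (4, 0, 0, ([] : List Char)) ∧
          (best = none ∨ ∃ k : pvK, best = some k ∧ k.1 = 2 ∧ k.2.1 = 4)) ∨
        (∃ i : Int, bi = some i ∧ best = some (2, bs.1, bs.2.1, bs.2.2.1, bs.2.2.2, i) ∧
          bs.1 < 4 ∧ ∀ v ∈ E, i < v.1)) →
      (if (E.foldl (pvStepA ui) (bs, bi)).1.1 < 4 then (E.foldl (pvStepA ui) (bs, bi)).2 else none) =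
        (match E.foldl (pvStepB ul ui) best with
         | none => none
         | some k => if k.1 = 2 ∧ k.2.1 = 4 then none else some k.2.2.2.2.2) := by
  intro E
  induction E with
  | nil =>
    intro bs bi best _ _ hinv
    simp only [List.foldl_nil]
    rcases hinv with ⟨hbi, hbs, hbest⟩ | ⟨i, hbi, hbest, hlt, _⟩
    · subst hbi hbs
      rcases hbest with rfl | ⟨k, rfl, hk1, hk2⟩
      · norm_num
      · simp [hk1, hk2]
    · subst hbi hbest
      simp only
      rw [if_pos hlt, if_neg (by simp; omega)]
  | cons v E ih =>
    intro bs bi best hcond hpw hinv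
    obtain ⟨hne, hnsw⟩ := hcond v List.mem_cons_self
    have hcond' : ∀ w ∈ E, PySem.Chars.lower w.2 ≠ ul ∧
        PySem.Chars.startswith (PySem.Chars.lower w.2) ul = false :=
      fun w hw => hcond w (List.mem_cons_of_mem _ hw)
    have hpw' := (List.pairwise_cons.mp hpw).2
    have hhead := (List.pairwise_cons.mp hpw).1
    have hkey : pvKey ul ui v = (2, (pvScoreA ui v.2).1, (pvScoreA ui v.2).2.1,
        (pvScoreA ui v.2).2.2.1, (pvScoreA ui v.2).2.2.2, v.1) := by
      rw [pvKey_other hne hnsw, pvScoreA_eq]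
    set sA := pvScoreA ui v.2 with hsA
    rw [List.foldl_cons, List.foldl_cons]
    rcases hinv with ⟨hbi, hbs, hbest⟩ | ⟨i, hbi, hbest, hbs4, hbound⟩
    · subst hbi hbs
      by_cases hlt : pvLt4 sA (4, 0, 0, ([] : List Char)) = true
      · have hs4 : sA.1 < 4 := pvLt4_init hlt
        have hA : pvStepA ui ((4, 0, 0, ([] : List Char)), none) v = (sA, some v.1) := by
          simp [pvStepA, ← hsA, hlt]
        have hB : pvStepB ul ui best v = some (2, sA.1, sA.2.1, sA.2.2.1, sA.2.2.2, v.1) := by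
          rcases hbest with rfl | ⟨k, rfl, hk1, hk2⟩
          · rw [pvStepB_none, hkey]
          · have hl : pvLt6 (pvKey ul ui v) k = true := by
              obtain ⟨k1, k2, k3, k4, k5, k6⟩ := k
              simp only at hk1 hk2
              subst hk1 hk2
              rw [hkey, pvLt6_iff]
              exact Or.inr ⟨rfl, Or.inl (by omega)⟩
            rw [pvStepB_some, if_pos hl, hkey]
        rw [hA, hB]
        exact ih sA (some v.1) _ hcond' hpw' (Or.inr ⟨v.1, rfl, rfl, hs4, hhead⟩)
      · have hs4 : sA.1 = 4 := by
          rcases pvScoreA_fst_cases ui v.2 with h0 | h0 | h0 | h0 | h0 <;>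
            first
              | (exfalso; exact hlt (pvLt4_of_fst_lt (by rw [← hsA] at h0; omega)))
              | (rw [← hsA] at h0; exact h0)
        have hA : pvStepA ui ((4, 0, 0, ([] : List Char)), none) v
            = ((4, 0, 0, ([] : List Char)), none) := by
          simp [pvStepA, ← hsA, hlt]
        rw [hA]
        have hB : ∃ k : pvK, pvStepB ul ui best v = some k ∧ k.1 = 2 ∧ k.2.1 = 4 := by
          rcases hbest with rfl | ⟨k, rfl, hk1, hk2⟩
          · exact ⟨_, pvStepB_none ul ui v, by rw [hkey], by rw [hkey]; exact hs4⟩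
          · by_cases hl6 : pvLt6 (pvKey ul ui v) k = true
            · exact ⟨_, by rw [pvStepB_some, if_pos hl6], by rw [hkey], by rw [hkey]; exact hs4⟩
            · refine ⟨k, ?_, hk1, hk2⟩
              rw [pvStepB_some, if_neg hl6]
        obtain ⟨k, hstep, hk1, hk2⟩ := hB
        rw [hstep]
        exact ih _ _ _ hcond' hpw' (Or.inl ⟨rfl, rfl, Or.inr ⟨k, rfl, hk1, hk2⟩⟩)
    · subst hbi hbest
      have hiv : i < v.1 := hbound v List.mem_cons_self
      by_cases hlt : pvLt4 sA bs = true
      · have hs4' : sA.1 < 4 := by have := pvLt4_fst_le hlt; omega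
        have hA : pvStepA ui (bs, some i) v = (sA, some v.1) := by
          simp [pvStepA, ← hsA, hlt]
        have hB : pvStepB ul ui (some (2, bs.1, bs.2.1, bs.2.2.1, bs.2.2.2, i)) v
            = some (2, sA.1, sA.2.1, sA.2.2.1, sA.2.2.2, v.1) := by
          have hl : pvLt6 (pvKey ul ui v) (2, bs.1, bs.2.1, bs.2.2.1, bs.2.2.2, i) = true := by
            rw [hkey, pvLt6_two_iff]
            exact Or.inl hlt
          rw [pvStepB_some, if_pos hl, hkey]
        rw [hA, hB]
        exact ih sA (some v.1) _ hcond' hpw' (Or.inr ⟨v.1, rfl, rfl, hs4', hhead⟩)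
      · have hA : pvStepA ui (bs, some i) v = (bs, some i) := by
          simp [pvStepA, ← hsA, hlt]
        have hB : pvStepB ul ui (some (2, bs.1, bs.2.1, bs.2.2.1, bs.2.2.2, i)) v
            = some (2, bs.1, bs.2.1, bs.2.2.1, bs.2.2.2, i) := by
          have hl : pvLt6 (pvKey ul ui v) (2, bs.1, bs.2.1, bs.2.2.1, bs.2.2.2, i) ≠ true := by
            rw [hkey]
            intro h
            rw [pvLt6_two_iff] at h
            rcases h with h | ⟨_, _, _, _, h5⟩
            · exact hlt h
            · omega
          rw [pvStepB_some, if_neg hl]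
        rw [hA, hB]
        exact ih bs (some i) _ hcond' hpw'
          (Or.inr ⟨i, rfl, rfl, hbs4, fun w hw => hbound w (List.mem_cons_of_mem _ hw)⟩)

-- ===== VERDICT (by name: the statement is the Claim_ definition above) =====
theorem resolve_package_selection_spec : Claim_equal_resolve_package_selection := by
  intro user_input packages _
  unfold Spec_resolve_package_selection
  unfold resolve_package_selection resolve_package_selection_alt
  dsimp only
  by_cases hd : PySem.Chars.strIsdigit (PySem.Chars.strip user_input.toList) = true
  · rw [if_pos hd, if_pos hd]
  · rw [if_neg hd, if_neg hd]
    set ui := user_input.toList with hui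
    set ul := PySem.Chars.strip (PySem.Chars.lower ui) with hul
    set E := PySem.List.enumerate (packages.map String.toList) 0 with hE
    have hpwE : List.Pairwise (fun a b : Int × List Char => a.1 < b.1) E := pvEnum_pairwise _ 0
    rcases hfe : pvFirstExact ul E with _ | i
    · -- no exact match
      have hne : ∀ v ∈ E, PySem.Chars.lower v.2 ≠ ul := (pvFirstExact_none_iff ul E).mp hfe
      rw [PySem.List.foldl_append_if
        (fun v : Int × List Char => PySem.Chars.startswith (PySem.Chars.lower v.2) ul)
        (fun v : Int × List Char => ((v.2.length : Int), v.1, v.2)) E []]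
      rw [List.nil_append]
      set p := fun v : Int × List Char => PySem.Chars.startswith (PySem.Chars.lower v.2) ul with hp
      set f := fun v : Int × List Char => ((v.2.length : Int), v.1, v.2) with hf
      by_cases hm : (E.filter p).map f ≠ []
      · rw [if_pos hm]
        rcases hs : PySem.List.sorted2 ((E.filter p).map f) (fun x => -x.1) (fun x => x.2.1) with _ | ⟨m, t⟩
        · exfalso
          have hperm := PySem.List.sorted2_perm ((E.filter p).map f) (fun x => -x.1) (fun x => x.2.1) false
          rw [hs] at hperm
          exact hm hperm.nil_eq.symm
        · have hmmem : m ∈ (E.filter p).map f := by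
            have hperm := PySem.List.sorted2_perm ((E.filter p).map f) (fun x => -x.1) (fun x => x.2.1) false
            rw [hs] at hperm
            exact hperm.mem_iff.mp List.mem_cons_self
          obtain ⟨u0, hu0f, hfu0⟩ := List.mem_map.mp hmmem
          have hu0E : u0 ∈ E := List.mem_of_mem_filter hu0f
          have hu0p : p u0 = true := List.of_mem_filter hu0f
          have hmin2 := pvSorted2_head_min (fun x => -x.1) (fun x => x.2.1) _ m t hs
          have hfold : E.foldl (pvStepB ul ui) none = some (pvKey ul ui u0) := by
            refine pvFoldB_min ul ui E u0 hu0E (fun v hv hvne => ?_)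
            rw [pvKey_sw (hne u0 hu0E) hu0p]
            by_cases hsw : p v = true
            · rw [pvKey_sw (hne v hv) hsw]
              have hvm : f v ∈ (E.filter p).map f :=
                List.mem_map.mpr ⟨v, List.mem_filter.mpr ⟨hv, hsw⟩, rfl⟩
              have hle := hmin2 (f v) hvm
              rw [← hfu0] at hle
              unfold pvLe2 at hle
              simp only [hf] at hle
              apply pvLt6_sw
              rcases hle with hlt | ⟨heq, hle2⟩
              · left; omega
              · right
                refine ⟨by omega, ?_⟩
                rcases lt_or_eq_of_le hle2 with h | h
                · exact h
                · exact absurd (pvPairwise_index_inj hpwE hu0E hv h) (fun hh => hvne hh.symm)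
            · rw [pvKey_other (hne v hv) (by simpa using hsw)]
              exact pvLt6_fst (by norm_num)
          rw [hfold, pvKey_sw (hne u0 hu0E) hu0p]
          rw [← hfu0]
          simp [hf]
      · rw [if_neg hm]
        rw [not_ne_iff] at hm
        have hnsw : ∀ v ∈ E, p v = false := by
          intro v hv
          have := List.map_eq_nil_iff.mp hm
          have hfil := List.filter_eq_nil_iff.mp this
          simpa using hfil v hv
        have := pvCase3_loop ui ul E (4, 0, 0, ([] : List Char)) none none
          (fun v hv => ⟨hne v hv, by simpa [hp] using hnsw v hv⟩) hpwE
          (Or.inl ⟨rfl, rfl, Or.inl rfl⟩)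
        exact this
    · -- exact match found at index i
      obtain ⟨E1, u, E2, hEeq, hu, hi, hall⟩ := pvFirstExact_some ul E i hfe
      have huE : u ∈ E := by rw [hEeq]; exact List.mem_append_right _ List.mem_cons_self
      have hfold : E.foldl (pvStepB ul ui) none = some (pvKey ul ui u) := by
        refine pvFoldB_min ul ui E u huE (fun v hv hvne => ?_)
        rw [pvKey_exact hu]
        by_cases hv2 : PySem.Chars.lower v.2 = ul
        · rw [pvKey_exact hv2]
          have hlt : u.1 < v.1 := by
            rw [hEeq] at hv
            rcases List.mem_append.mp hv with hv1 | hv1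
            · exact absurd hv2 (hall v hv1)
            · rcases List.mem_cons.mp hv1 with rfl | hv1
              · exact absurd rfl hvne
              · have hpw2 := hpwE
                rw [hEeq] at hpw2
                have := (List.pairwise_append.mp hpw2).2.1
                exact (List.pairwise_cons.mp this).1 v hv1
          exact pvLt6_zeros hlt
        · by_cases hsw : PySem.Chars.startswith (PySem.Chars.lower v.2) ul = true
          · rw [pvKey_sw hv2 hsw]
            exact pvLt6_fst (by norm_num)
          · rw [pvKey_other hv2 (by simpa using hsw)]
            exact pvLt6_fst (by norm_num)
      rw [hfold, pvKey_exact hu, hi]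
      simp
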